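-- pv_equiv track=rewrite | github.com/renanmoretto/master_distributor | master_distributor/distributors/_slice_distributors.py | _get_vertical_qty_per_portfolio
-- ===== SOURCE A (Python) =====
-- from collections import defaultdict
--
-- def _get_vertical_qty_per_portfolio(
--     allocations: list[tuple[str, int]],
-- ) -> dict[str, int]:
--     vertical_qty_per_portfolio: dict[str, int] = defaultdict(int)
--     for portfolio, qty in allocations:
--         if qty != 0:
--             vertical_qty_per_portfolio[portfolio] += qty
--     return vertical_qty_per_portfolio
-- ===== SOURCE B (Python) =====
-- from collections import defaultdict
--
--
-- def _get_vertical_qty_per_portfolio(allocations):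
--     items = [(p, q) for p, q in allocations if q != 0]
--     order = dict.fromkeys(p for p, _ in items)
--     return defaultdict(int, {p: sum(q for pp, q in items if pp == p) for p in order})
-- ===== Notes on version B (the rewrite author's own statement) =====
-- stated objective: alternative
-- what changed: Replaces A's single-pass incremental dict accumulation with a filter of zero quantities, an ordered key dedup (dict.fromkeys), and a per-key summation pass building the result dict in one comprehension.
import Mathlib
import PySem

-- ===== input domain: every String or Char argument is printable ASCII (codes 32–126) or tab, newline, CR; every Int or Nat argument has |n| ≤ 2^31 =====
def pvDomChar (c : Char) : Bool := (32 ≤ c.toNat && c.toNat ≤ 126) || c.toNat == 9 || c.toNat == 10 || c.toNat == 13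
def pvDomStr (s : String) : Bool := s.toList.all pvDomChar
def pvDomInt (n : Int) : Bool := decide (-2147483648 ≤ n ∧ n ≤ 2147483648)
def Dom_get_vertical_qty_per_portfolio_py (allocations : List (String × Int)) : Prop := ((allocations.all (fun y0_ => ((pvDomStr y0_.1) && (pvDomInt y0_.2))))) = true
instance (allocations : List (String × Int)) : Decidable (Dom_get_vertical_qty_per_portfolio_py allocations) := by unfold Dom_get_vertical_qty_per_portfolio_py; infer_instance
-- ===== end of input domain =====

-- B replaces A's incremental dict accumulation with: filter zero quantities, dedup keys in first-occurrence order, then one per-key summation pass (objective: alternative).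


-- ===== PORT A =====
def get_vertical_qty_per_portfolio_py (allocations : List (String × Int)) : List (String × Int) :=
  (allocations.foldl
    (fun d x => if x.2 ≠ 0 then d.insert x.1 (d.getD x.1 0 + x.2) else d)
    (PySem.Dict.empty : PySem.Dict String Int)).items

-- ===== PORT B =====
def get_vertical_qty_per_portfolio_py_alt (allocations : List (String × Int)) : List (String × Int) :=
  let items := allocations.filter (fun x => x.2 ≠ 0)
  let order := PySem.List.dedup (items.map (·.1))
  order.map (fun p => (p, ((items.filter (fun x => x.1 == p)).map (·.2)).sum))

-- ===== PRECONDITION & SPEC =====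
def Spec_get_vertical_qty_per_portfolio_py (allocations : List (String × Int)) (out : List (String × Int)) : Prop := out = get_vertical_qty_per_portfolio_py_alt allocations
instance (allocations : List (String × Int)) (out : List (String × Int)) : Decidable (Spec_get_vertical_qty_per_portfolio_py allocations out) := by unfold Spec_get_vertical_qty_per_portfolio_py; infer_instance

-- ===== CLAIM (what is proved, stated in full; the proofs are below) =====
def Claim_equal_get_vertical_qty_per_portfolio_py : Prop := ∀ (allocations : List (String × Int)), Dom_get_vertical_qty_per_portfolio_py allocations → Spec_get_vertical_qty_per_portfolio_py allocations (get_vertical_qty_per_portfolio_py allocations)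

-- ===== LEMMAS AND PROOFS =====

-- The accumulation loop's value at a key is the base value plus the sum of matching quantities.
theorem getD_fold_insert_add (ys : List (String × Int)) (d : PySem.Dict String Int) (k : String) :
    (ys.foldl (fun d x => d.insert x.1 (d.getD x.1 0 + x.2)) d).getD k 0
      = d.getD k 0 + ((ys.filter (fun x => x.1 == k)).map (·.2)).sum := by
  induction ys generalizing d with
  | nil => simp
  | cons y ys ih =>
    simp only [List.foldl_cons, ih, List.filter_cons]
    by_cases h : y.1 = k
    · simp [h]
      ring
    · simp [h, PySem.Dict.getD_insert, Ne.symm h]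

theorem fold_items_eq (ys : List (String × Int)) :
    (ys.foldl (fun d x => d.insert x.1 (d.getD x.1 0 + x.2))
        (PySem.Dict.empty : PySem.Dict String Int)).items
      = (PySem.List.dedup (ys.map (·.1))).map
          (fun p => (p, ((ys.filter (fun x => x.1 == p)).map (·.2)).sum)) := by
  have hnd : (ys.foldl (fun d x => d.insert x.1 (d.getD x.1 0 + x.2))
      (PySem.Dict.empty : PySem.Dict String Int)).keys.Nodup :=
    PySem.Dict.nodup_keys_foldl_insert_key ys Prod.fst
      (fun d x => d.getD x.1 0 + x.2) PySem.Dict.empty (by simp)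
  rw [PySem.Dict.items_eq_map_keys _ hnd 0,
    PySem.Dict.keys_foldl_insert_key ys Prod.fst (fun d x => d.getD x.1 0 + x.2)]
  simp only [PySem.Dict.keys_empty, PySem.Set.update_nil_left, PySem.List.dedup_eq_ofList]
  exact List.map_congr_left (fun k _ => by rw [getD_fold_insert_add]; simp)

-- ===== VERDICT (by name: the statement is the Claim_ definition above) =====
theorem get_vertical_qty_per_portfolio_py_spec : Claim_equal_get_vertical_qty_per_portfolio_py := by
  intro allocations _
  unfold Spec_get_vertical_qty_per_portfolio_py get_vertical_qty_per_portfolio_py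
    get_vertical_qty_per_portfolio_py_alt
  simp only []
  rw [show (fun (d : PySem.Dict String Int) (x : String × Int) => if x.2 ≠ 0 then d.insert x.1 (d.getD x.1 0 + x.2) else d)
      = (fun d x => if decide (x.2 ≠ 0) = true then d.insert x.1 (d.getD x.1 0 + x.2) else d) from by
        funext d x; simp, ← List.foldl_filter]
  exact fold_items_eq _
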